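-- pv_equiv track=rewrite | github.com/TaylorFinklea/simmersmith | scripts/simmersmith_cli.py | applescript_string
-- ===== SOURCE A (Python) =====
-- def applescript_string(value: str) -> str:
--     normalized = value.replace("\r\n", "\n").replace("\r", "\n")
--     parts = normalized.split("\n")
--     rendered_parts = []
--     for part in parts:
--         escaped = part.replace("\\", "\\\\").replace('"', '\\"')
--         rendered_parts.append(f'"{escaped}"')
--     return " & linefeed & ".join(rendered_parts) if rendered_parts else '""'
-- ===== SOURCE B (Python) =====
-- def applescript_string(value: str) -> str:
--     normalized = value.replace("\r\n", "\n").replace("\r", "\n")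
--     escaped = normalized.replace("\\", "\\\\").replace('"', '\\"')
--     return '"' + escaped.replace("\n", '" & linefeed & "') + '"'
-- ===== Notes on version B (the rewrite author's own statement) =====
-- stated objective: simpler
-- what changed: B drops A's split-into-lines, per-line loop and join: it escapes the whole normalized string once and replaces each newline inline with the quoted linefeed separator in a single expression.
import Mathlib
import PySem

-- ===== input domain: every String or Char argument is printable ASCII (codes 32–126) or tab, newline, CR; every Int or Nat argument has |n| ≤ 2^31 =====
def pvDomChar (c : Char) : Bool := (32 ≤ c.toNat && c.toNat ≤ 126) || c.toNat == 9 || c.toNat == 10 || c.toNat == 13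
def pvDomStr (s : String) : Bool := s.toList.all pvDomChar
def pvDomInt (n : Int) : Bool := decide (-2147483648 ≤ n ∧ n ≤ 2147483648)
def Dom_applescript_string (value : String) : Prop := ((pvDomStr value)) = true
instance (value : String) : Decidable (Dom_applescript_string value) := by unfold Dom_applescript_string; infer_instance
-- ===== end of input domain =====

-- B replaces A's split-into-lines / per-line loop / join by escaping the whole
-- normalized string once and replacing each newline inline with the quoted
-- linefeed separator (objective: simpler — no loop, no intermediate list).

-- ===== PORT A =====
def applescript_string (value : String) : String :=
  let normalized := PySem.Chars.replace
    (PySem.Chars.replace value.toList ['\r', '\n'] ['\n']) ['\r'] ['\n']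
  let parts := PySem.Chars.splitOn normalized ['\n']
  let rendered := parts.foldl (fun acc part =>
      acc ++ [['"'] ++
        PySem.Chars.replace (PySem.Chars.replace part ['\\'] ['\\', '\\']) ['"'] ['\\', '"']
        ++ ['"']]) ([] : List (List Char))
  if rendered = [] then String.ofList ['"', '"']
  else String.ofList (PySem.Chars.join (" & linefeed & " : String).toList rendered)

-- ===== PORT B =====
def applescript_string_alt (value : String) : String :=
  let normalized := PySem.Chars.replace
    (PySem.Chars.replace value.toList ['\r', '\n'] ['\n']) ['\r'] ['\n']
  let escaped := PySem.Chars.replace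
    (PySem.Chars.replace normalized ['\\'] ['\\', '\\']) ['"'] ['\\', '"']
  String.ofList (['"'] ++
    PySem.Chars.replace escaped ['\n'] ('"' :: (" & linefeed & " : String).toList ++ ['"'])
    ++ ['"'])

-- ===== PRECONDITION & SPEC =====
def Spec_applescript_string (value : String) (out : String) : Prop := out = applescript_string_alt value
instance (value : String) (out : String) : Decidable (Spec_applescript_string value out) := by unfold Spec_applescript_string; infer_instance

-- ===== CLAIM (what is proved, stated in full; the proofs are below) =====
def Claim_equal_applescript_string : Prop := ∀ (value : String), Dom_applescript_string value → Spec_applescript_string value (applescript_string value)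

-- ===== LEMMAS AND PROOFS =====

-- step equations for the fueled replace loop, specialised to a one-character pattern
theorem replace_go_nil (c : Char) (new acc : List Char) (fuel : Nat) :
    PySem.Chars.replace.go [c] new fuel [] acc = acc.reverse := by
  cases fuel <;> (rw [PySem.Chars.replace.go.eq_def]; try simp)

theorem replace_go_cons (c x : Char) (new t acc : List Char) (f : Nat) :
    PySem.Chars.replace.go [c] new (f + 1) (x :: t) acc =
      if c = x then PySem.Chars.replace.go [c] new f t (new.reverse ++ acc)
      else PySem.Chars.replace.go [c] new f t (x :: acc) := by
  rw [PySem.Chars.replace.go.eq_def]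
  by_cases h : c = x <;> simp [List.isPrefixOf, h]

-- single-character replace computes a flatMap
theorem replace_go_single (c : Char) (new : List Char) :
    ∀ (l : List Char) (fuel : Nat) (acc : List Char), l.length ≤ fuel →
      PySem.Chars.replace.go [c] new fuel l acc =
        acc.reverse ++ l.flatMap (fun x => if x = c then new else [x])
  | [], fuel, acc, _ => by simp [replace_go_nil]
  | x :: t, fuel, acc, h => by
      cases fuel with
      | zero => simp at h
      | succ f =>
        have ht : t.length ≤ f := by simpa using h
        rw [replace_go_cons]
        by_cases hx : x = c
        · rw [if_pos hx.symm, replace_go_single c new t f _ ht]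
          simp [hx]
        · rw [if_neg (fun hh => hx hh.symm), replace_go_single c new t f _ ht]
          simp [hx]

theorem replace_single (l : List Char) (c : Char) (new : List Char) :
    PySem.Chars.replace l [c] new = l.flatMap (fun x => if x = c then new else [x]) := by
  simpa [PySem.Chars.replace, List.isEmpty] using
    replace_go_single c new l l.length [] (le_refl _)

-- splitting on a single character, as a plain structural recursion
def splitc (c : Char) : List Char → List (List Char)
  | [] => [[]]
  | x :: t => if x = c then [] :: splitc c t else (splitc c t).modifyHead (x :: ·)

theorem splitc_ne_nil (c : Char) : ∀ (l : List Char), splitc c l ≠ []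
  | [] => by simp [splitc]
  | x :: t => by
      have ih := splitc_ne_nil c t
      simp only [splitc]
      split
      · simp
      · cases hs : splitc c t with
        | nil => exact absurd hs ih
        | cons p ps => simp [List.modifyHead]

theorem splitOn_go_nil (c : Char) (cur : List Char) (acc : List (List Char)) (fuel : Nat) :
    PySem.Chars.splitOn.go [c] fuel [] cur acc = acc.reverse ++ [cur.reverse] := by
  cases fuel <;> (rw [PySem.Chars.splitOn.go.eq_def]; simp)

theorem splitOn_go_cons (c x : Char) (t cur : List Char) (acc : List (List Char)) (f : Nat) :
    PySem.Chars.splitOn.go [c] (f + 1) (x :: t) cur acc =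
      if c = x then PySem.Chars.splitOn.go [c] f t [] (cur.reverse :: acc)
      else PySem.Chars.splitOn.go [c] f t (x :: cur) acc := by
  rw [PySem.Chars.splitOn.go.eq_def]
  by_cases h : c = x <;> simp [List.isPrefixOf, h]

theorem splitOn_go_single (c : Char) :
    ∀ (l : List Char) (fuel : Nat) (cur : List Char) (acc : List (List Char)),
      l.length ≤ fuel →
      PySem.Chars.splitOn.go [c] fuel l cur acc =
        acc.reverse ++ (splitc c l).modifyHead (cur.reverse ++ ·)
  | [], fuel, cur, acc, _ => by simp [splitOn_go_nil, splitc, List.modifyHead]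
  | x :: t, fuel, cur, acc, h => by
      cases fuel with
      | zero => simp at h
      | succ f =>
        have ht : t.length ≤ f := by simpa using h
        rw [splitOn_go_cons]
        by_cases hx : x = c
        · rw [if_pos hx.symm, splitOn_go_single c t f [] (cur.reverse :: acc) ht]
          cases hs : splitc c t <;> simp [splitc, hx, hs, List.modifyHead]
        · rw [if_neg (fun hh => hx hh.symm), splitOn_go_single c t f (x :: cur) acc ht]
          cases hs : splitc c t with
          | nil => exact absurd hs (splitc_ne_nil c t)
          | cons p ps => simp [splitc, hx, hs, List.modifyHead]

theorem splitOn_single (l : List Char) (c : Char) :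
    PySem.Chars.splitOn l [c] = splitc c l := by
  rw [PySem.Chars.splitOn, splitOn_go_single c l (l.length + 1) [] [] (by omega)]
  cases hs : splitc c l with
  | nil => exact absurd hs (splitc_ne_nil c l)
  | cons p ps => simp [List.modifyHead]

-- the combined escape map
def escChar (x : Char) : List Char :=
  if x = '\\' then ['\\', '\\'] else if x = '"' then ['\\', '"'] else [x]

theorem esc_eq_flatMap (l : List Char) :
    PySem.Chars.replace (PySem.Chars.replace l ['\\'] ['\\', '\\']) ['"'] ['\\', '"'] =
      l.flatMap escChar := by
  rw [replace_single, replace_single, List.flatMap_assoc]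
  apply List.flatMap_congr
  intro x _
  by_cases h1 : x = '\\'
  · simp [h1, escChar]
  · by_cases h2 : x = '"'
    · simp [h2, escChar]
    · simp [h1, h2, escChar]

-- escaping commutes with replacing '\n' by the quoted separator
theorem replace_nl_esc (sep : List Char) (l : List Char) :
    PySem.Chars.replace (l.flatMap escChar) ['\n'] ('"' :: sep ++ ['"']) =
      l.flatMap (fun x => if x = '\n' then '"' :: sep ++ ['"'] else escChar x) := by
  rw [replace_single, List.flatMap_assoc]
  apply List.flatMap_congr
  intro x _
  by_cases h1 : x = '\\'
  · simp [h1, escChar]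
  · by_cases h2 : x = '"'
    · simp [h2, escChar]
    · by_cases h3 : x = '\n'
      · simp [h3, escChar]
      · simp [h1, h2, h3, escChar]

-- the core identity: wrap-each-part-and-join equals wrap-once-around-inline-replace
theorem inter_cons2 (sep x y : List Char) (l : List (List Char)) :
    sep.intercalate (x :: y :: l) = x ++ sep ++ sep.intercalate (y :: l) := by
  simp [List.intercalate]

theorem inter_one (sep x : List Char) : sep.intercalate [x] = x := by
  simp [List.intercalate]

-- the core identity: wrap-each-part-and-join equals wrap-once-around-inline-replace
theorem core (sep : List Char) :
    ∀ (ns : List Char),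
      sep.intercalate ((splitc '\n' ns).map (fun p => '"' :: p.flatMap escChar ++ ['"'])) =
        '"' :: ns.flatMap (fun x => if x = '\n' then '"' :: sep ++ ['"'] else escChar x) ++ ['"']
  | [] => by simp [splitc, List.intercalate]
  | x :: t => by
      have ih := core sep t
      by_cases hx : x = '\n'
      · subst hx
        rw [show splitc '\n' ('\n' :: t) = [] :: splitc '\n' t from by simp [splitc]]
        cases hs : splitc '\n' t with
        | nil => exact absurd hs (splitc_ne_nil '\n' t)
        | cons p ps =>
          rw [hs] at ih
          simp only [List.map_cons]
          rw [inter_cons2]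
          rw [List.map_cons] at ih
          rw [ih]
          simp
      · rw [show splitc '\n' (x :: t) = (splitc '\n' t).modifyHead (x :: ·) from by
          simp [splitc, hx]]
        cases hs : splitc '\n' t with
        | nil => exact absurd hs (splitc_ne_nil '\n' t)
        | cons p ps =>
          rw [hs] at ih
          simp only [List.modifyHead, List.map_cons, List.flatMap_cons, if_neg hx]
          cases ps with
          | nil =>
            rw [List.map_cons, List.map_nil, inter_one] at ih
            rw [List.map_nil, inter_one]
            injection ih with _ ih2
            simp only [List.append_eq] at ih2
            rw [List.cons_append, List.append_assoc, ih2]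
            simp
          | cons p2 ps2 =>
            rw [List.map_cons, List.map_cons, inter_cons2] at ih
            rw [List.map_cons, inter_cons2]
            simp only [List.cons_append, List.cons.injEq, true_and, List.append_assoc] at ih ⊢
            rw [ih]

-- ===== VERDICT (by name: the statement is the Claim_ definition above) =====
theorem applescript_string_spec : Claim_equal_applescript_string := by
  intro value _
  unfold Spec_applescript_string applescript_string applescript_string_alt
  simp only [PySem.List.foldl_append_singleton_eq_map, List.nil_append]
  set ns := PySem.Chars.replace
    (PySem.Chars.replace value.toList ['\r', '\n'] ['\n']) ['\r'] ['\n'] with hns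
  rw [splitOn_single]
  have hne : (splitc '\n' ns).map (fun part =>
      ['"'] ++ PySem.Chars.replace (PySem.Chars.replace part ['\\'] ['\\', '\\']) ['"'] ['\\', '"'] ++ ['"']) ≠ [] := by
    simp [splitc_ne_nil]
  rw [if_neg hne]
  have hmap : (splitc '\n' ns).map (fun part =>
      ['"'] ++ PySem.Chars.replace (PySem.Chars.replace part ['\\'] ['\\', '\\']) ['"'] ['\\', '"'] ++ ['"']) =
      (splitc '\n' ns).map (fun p => '"' :: p.flatMap escChar ++ ['"']) := by
    apply List.map_congr_left
    intro p _
    rw [esc_eq_flatMap]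
    simp
  rw [hmap, esc_eq_flatMap, replace_nl_esc]
  rw [PySem.Chars.join, core]
  simp
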